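-- pv_equiv track=rewrite | github.com/danielacatelan/ILLP-Loop_Perforation | Accept/script.py | modifica_loop_for
-- ===== SOURCE A (Python) =====
-- funcao = 'ADDX'
--
-- def obter_incremento(linha):
--     pos_i = 0
--     pos_f = 0
--
--     cont = 0
--     for i in range(len(linha)):
--         if linha[i] == ';':
--             cont += 1
--
--         if cont == 2:
--             i += 1
--             while(linha[i] == ' '):
--                 i += 1
--             pos_i = i
--             while(linha[i] != ')'):
--                 i += 1
--             pos_f = i - 1
--
--             break
--
--     return [linha[pos_i:pos_f + 1], pos_i, pos_f]
--
-- def modifica_incremento(dados, param):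
--     incremento = dados[0]
--     param = str(2 ** int(param))
--     var = ''
--
--     tam = len(incremento)
--
--     for i in range(tam):
--         while i < tam and (incremento[i] != '_' and not incremento[i].isalnum()):
--             i += 1
--
--         while i < tam and (incremento[i].isalnum() or incremento[i] == '_'):
--             var += incremento[i]
--             i += 1
--
--         break
--
--     if '+' in incremento:
--         dados[0] = var + ' = ' + funcao + '(' + var + ', ' + str(param) + ')'
--     elif '-' in incremento:
--         dados[0] = var + ' = ' + var + ' - ' + str(param)
--
-- def modifica_loop_for(instrucaoFor, param):
--     incremento = obter_incremento(instrucaoFor)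
--     modifica_incremento(incremento, param)
--
--     nova_linha = ''
--
--     i = 0
--     while(i < len(instrucaoFor)):
--         if i != incremento[1]:
--             nova_linha += instrucaoFor[i]
--             i += 1
--         else:
--             nova_linha += incremento[0]
--             i = incremento[2] + 1
--
--     return nova_linha
-- ===== SOURCE B (Python) =====
-- funcao = 'ADDX'
--
-- def _first_ident(s):
--     # first run of identifier characters ([A-Za-z0-9_]) in s
--     var = ''
--     seen = False
--     for c in s:
--         if c.isalnum() or c == '_':
--             var += c
--             seen = True
--         elif seen:
--             break
--     return var
--
-- def _rewrite(inc, p):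
--     # '+' increment -> var = ADDX(var, p);  '-' increment -> var = var - p
--     var = _first_ident(inc)
--     if '+' in inc:
--         return var + ' = ' + funcao + '(' + var + ', ' + p + ')'
--     if '-' in inc:
--         return var + ' = ' + var + ' - ' + p
--     return inc
--
-- def modifica_loop_for(instrucaoFor, param):
--     p = str(2 ** int(param))
--     i1 = instrucaoFor.find(';')
--     i2 = instrucaoFor.find(';', i1 + 1)
--     if i2 == -1:
--         return instrucaoFor          # no increment clause to rewrite
--     tail = instrucaoFor[i2 + 1:]
--     stripped = tail.lstrip(' ')
--     prefix = instrucaoFor[:len(instrucaoFor) - len(stripped)]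
--     j = stripped.find(')')
--     return prefix + _rewrite(stripped[:j], p) + stripped[j:]
-- ===== Notes on version B (the rewrite author's own statement) =====
-- stated objective: idiomatic
-- what changed: B replaces A's counting index-scan, manual space/paren walks and char-by-char rebuild loop with two find() calls, lstrip(' '), slicing (prefix + rewritten_clause + rest) and a single-pass identifier extractor; Pre_ excludes inputs where A raises (non-int param, missing ')' after the second ';'), loops forever (')' right after the second ';'), or returns a float-valued string (negative param) that the integer port cannot express.
-- intended difference: On headers with fewer than two ';' whose first character is '+' or '-', A's fallback rewrites the first character as if it were the increment clause (e.g. '+x' -> ' = ADDX(, 1)x') while B returns the input unchanged, the intended value since there is no increment clause to rewrite. — e.g. on modifica_loop_for("+x", "0"): A returns " = ADDX(, 1)x", B returns "+x"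
-- outside the precondition, e.g. on modifica_loop_for('+5', ' -4'): A returns ' = ADDX(, 0.0625)5', B returns '+5'
import Mathlib
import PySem

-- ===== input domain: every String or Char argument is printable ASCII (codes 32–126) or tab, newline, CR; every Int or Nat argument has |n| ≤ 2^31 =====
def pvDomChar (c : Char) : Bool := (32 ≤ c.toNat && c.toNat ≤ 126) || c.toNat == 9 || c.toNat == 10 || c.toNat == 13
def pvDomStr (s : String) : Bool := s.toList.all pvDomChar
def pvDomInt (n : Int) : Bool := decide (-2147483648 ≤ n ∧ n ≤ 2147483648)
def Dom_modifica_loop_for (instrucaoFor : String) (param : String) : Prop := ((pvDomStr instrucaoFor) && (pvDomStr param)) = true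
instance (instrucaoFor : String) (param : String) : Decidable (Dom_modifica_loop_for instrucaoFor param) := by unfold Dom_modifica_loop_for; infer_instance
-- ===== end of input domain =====

-- B replaces A's index-walking scans and char-by-char rebuild by two find calls, an
-- lstrip, slices, and a single-pass identifier extractor (objective: idiomatic);
-- on headers without a second ';' B returns the input unchanged (see D_ below).

-- ===== PORT A =====
-- Port of A over List Char: each index loop becomes the obvious structural recursion on
-- the scanned suffix, with the index carried along and the same comparisons and state.

def pvFuncao : List Char := ['A', 'D', 'D', 'X']   -- funcao = 'ADDX'

-- str(2 ** int(param)); integer-exact for int(param) ≥ 0 — Pre_ excludes ValueError and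
-- negative exponents (where Python produces a float). Shared verbatim by A and B.
def pvPow2 (param : String) : List Char :=
  match PySem.Int.ofStr? param with
  | some n => PySem.Int.toChars ((2 : Int) ^ n.toNat)
  | none => []

-- while linha[i] == ' ': i += 1   (none = IndexError; returns chars skipped and the rest)
def pvSkipSpacesA : List Char → Option (Nat × List Char)
  | [] => none
  | c :: r => if c = ' ' then (pvSkipSpacesA r).map (fun p => (p.1 + 1, p.2)) else some (0, c :: r)

-- while linha[i] != ')': i += 1   (none = IndexError; returns number of chars stepped over)
def pvFindParenA : List Char → Option Nat
  | [] => none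
  | c :: r => if c = ')' then some 0 else (pvFindParenA r).map (· + 1)

-- the counting for-loop of obter_incremento: some (pos_i, pos_f); none = IndexError
def pvScanA : List Char → Nat → Nat → Option (Nat × Nat)
  | [], _, _ => some (0, 0)
  | c :: r, i, cont =>
    let cont' := if c = ';' then cont + 1 else cont
    if cont' = 2 then
      match pvSkipSpacesA r with
      | none => none
      | some (k, r') =>
        match pvFindParenA r' with
        | none => none
        | some m => some (i + 1 + k, i + k + m)   -- pos_i = i+1+k, pos_f = pos_i + m - 1
    else pvScanA r (i + 1) cont'

-- first while of modifica_incremento: skip chars that are neither '_' nor alphanumeric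
def pvSkipNW : List Char → List Char
  | [] => []
  | c :: r => if c ≠ '_' ∧ ¬ (PySem.Chars.isalnum c = true) then pvSkipNW r else c :: r

-- second while of modifica_incremento: var += c while alphanumeric or '_'
def pvCollectA : List Char → List Char → List Char
  | [], var => var
  | c :: r, var =>
    if PySem.Chars.isalnum c = true ∨ c = '_' then pvCollectA r (var ++ [c]) else var

-- modifica_incremento: the new dados[0]
def pvModIncA (inc p : List Char) : List Char :=
  let var := pvCollectA (pvSkipNW inc) []
  if PySem.Chars.isIn ['+'] inc then
    var ++ [' ', '=', ' '] ++ pvFuncao ++ ['('] ++ var ++ [',', ' '] ++ p ++ [')']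
  else if PySem.Chars.isIn ['-'] inc then
    var ++ [' ', '=', ' '] ++ var ++ [' ', '-', ' '] ++ p
  else inc

-- the rebuilding while-loop of modifica_loop_for; the fuel only makes it total (Python
-- diverges exactly where the fuel would run out, and Pre_ excludes those inputs)
def pvRebuildA (l : List Char) (pi pf : Nat) (d0 : List Char) : Nat → Nat → List Char → List Char
  | 0, _, acc => acc
  | fuel + 1, i, acc =>
    if h : i < l.length then
      if i ≠ pi then pvRebuildA l pi pf d0 fuel (i + 1) (acc ++ [l[i]])
      else pvRebuildA l pi pf d0 fuel (pf + 1) (acc ++ d0)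
    else acc

def modifica_loop_for (instrucaoFor : String) (param : String) : String :=
  let l := instrucaoFor.toList
  match pvScanA l 0 0 with
  | none => ""   -- obter_incremento raises IndexError here (outside Pre_)
  | some (pi, pf) =>
    let inc := PySem.List.slice l (some (pi : Int)) (some ((pf : Int) + 1))
    let d0 := pvModIncA inc (pvPow2 param)
    String.ofList (pvRebuildA l pi pf d0 (l.length + 1) 0 [])

-- ===== PORT B =====
-- Port of Source B: find / find-from-i1+1 to locate the two ';' (return the input unchanged
-- when there is no second one), dropWhile for lstrip(' '), slices for the three pieces,
-- and _first_ident's single flagged pass.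

-- _first_ident: one pass with a 'seen' flag
def pvIdentB : List Char → Bool → List Char → List Char
  | [], _, var => var
  | c :: r, seen, var =>
    if PySem.Chars.isalnum c = true ∨ c = '_' then pvIdentB r true (var ++ [c])
    else if seen then var else pvIdentB r seen var

-- _rewrite: the increment clause rewritten
def pvRewriteB (inc p : List Char) : List Char :=
  let var := pvIdentB inc false []
  if PySem.Chars.isIn ['+'] inc then
    var ++ [' ', '=', ' '] ++ pvFuncao ++ ['('] ++ var ++ [',', ' '] ++ p ++ [')']
  else if PySem.Chars.isIn ['-'] inc then
    var ++ [' ', '=', ' '] ++ var ++ [' ', '-', ' '] ++ p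
  else inc

def modifica_loop_for_alt (instrucaoFor : String) (param : String) : String :=
  let l := instrucaoFor.toList
  let p := pvPow2 param
  let i1 := PySem.Chars.find l [';']
  let i2 := PySem.Chars.findFrom l [';'] (i1 + 1) none
  if i2 = -1 then instrucaoFor
  else
    let tail := PySem.List.slice l (some (i2 + 1)) none
    let stripped := tail.dropWhile (· == ' ')   -- tail.lstrip(' '): exact (drops exactly the leading ' ' characters)
    let pre := PySem.List.slice l none (some (PySem.List.len l - PySem.List.len stripped))
    let j := PySem.Chars.find stripped [')']
    String.ofList (pre ++ pvRewriteB (PySem.List.slice stripped none (some j)) p ++ PySem.List.slice stripped (some j) none)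

-- ===== PRECONDITION & SPEC =====
-- Pre_ excludes: params that int() rejects (A raises ValueError) or whose value is negative
-- (2**int(param) is then a Python float, which the integer port cannot express), and headers
-- with a second ';' after which A's space/paren scan raises IndexError or A's rebuild loop
-- never terminates (first non-space char is ')').
def Pre_modifica_loop_for (instrucaoFor : String) (param : String) : Prop :=
  (PySem.Int.ofStr? param).any (fun n => decide (0 ≤ n)) = true ∧
  (2 ≤ instrucaoFor.toList.count ';' →
    (((((instrucaoFor.toList.dropWhile (· != ';')).drop 1).dropWhile (· != ';')).drop 1).dropWhile (· == ' ')).head? ≠ some ')' ∧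
    ')' ∈ ((((instrucaoFor.toList.dropWhile (· != ';')).drop 1).dropWhile (· != ';')).drop 1).dropWhile (· == ' '))

instance (instrucaoFor : String) (param : String) : Decidable (Pre_modifica_loop_for instrucaoFor param) := by
  unfold Pre_modifica_loop_for; infer_instance

def pvWitness_modifica_loop_for : String × String := ("for(i = 0; i < n; i = i + 1)", "2")

-- On headers with fewer than two ';' that start with '+' or '-', A's fallback rewrites the
-- first character as if it were the increment clause (e.g. '+x' ↦ ' = ADDX(, 1)x') while B
-- returns the input unchanged, the intended value since there is no increment clause.
def D_modifica_loop_for (instrucaoFor : String) (param : String) : Prop :=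
  instrucaoFor.toList.count ';' < 2 ∧
  (instrucaoFor.toList.head? = some '+' ∨ instrucaoFor.toList.head? = some '-')

instance (instrucaoFor : String) (param : String) : Decidable (D_modifica_loop_for instrucaoFor param) := by
  unfold D_modifica_loop_for; infer_instance

def Spec_modifica_loop_for (instrucaoFor : String) (param : String) (out : String) : Prop :=
  ¬ D_modifica_loop_for instrucaoFor param → out = modifica_loop_for_alt instrucaoFor param
instance (instrucaoFor : String) (param : String) (out : String) : Decidable (Spec_modifica_loop_for instrucaoFor param out) := by unfold Spec_modifica_loop_for; infer_instance

def pvDiffWitness_modifica_loop_for : String × String := ("+x", "0")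
def pvDiffWitnessOut_modifica_loop_for : String × String := (" = ADDX(, 1)x", "+x")

-- ===== CLAIM (what is proved, stated in full; the proofs are below) =====
def Claim_unchanged_modifica_loop_for : Prop := ∀ (instrucaoFor : String) (param : String), Dom_modifica_loop_for instrucaoFor param → Pre_modifica_loop_for instrucaoFor param → Spec_modifica_loop_for instrucaoFor param (modifica_loop_for instrucaoFor param)
def Claim_changed_modifica_loop_for : Prop := Dom_modifica_loop_for (pvDiffWitness_modifica_loop_for.1) (pvDiffWitness_modifica_loop_for.2) ∧ Pre_modifica_loop_for (pvDiffWitness_modifica_loop_for.1) (pvDiffWitness_modifica_loop_for.2) ∧ D_modifica_loop_for (pvDiffWitness_modifica_loop_for.1) (pvDiffWitness_modifica_loop_for.2) ∧ modifica_loop_for (pvDiffWitness_modifica_loop_for.1) (pvDiffWitness_modifica_loop_for.2) = pvDiffWitnessOut_modifica_loop_for.1 ∧ modifica_loop_for_alt (pvDiffWitness_modifica_loop_for.1) (pvDiffWitness_modifica_loop_for.2) = pvDiffWitnessOut_modifica_loop_for.2 ∧ pvDiffWitnessOut_modifica_loop_for.1 ≠ pvDiffWitnessOut_modifica_loop_f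or.2
def Claim_exact_modifica_loop_for : Prop := ∀ (instrucaoFor : String) (param : String), Dom_modifica_loop_for instrucaoFor param → Pre_modifica_loop_for instrucaoFor param → D_modifica_loop_for instrucaoFor param → modifica_loop_for instrucaoFor param ≠ modifica_loop_for_alt instrucaoFor param

-- ===== LEMMAS AND PROOFS =====

lemma pv_skipA_decomp (sp : List Char) (c : Char) (r : List Char)
    (hsp : ∀ x ∈ sp, x = ' ') (hc : c ≠ ' ') :
    pvSkipSpacesA (sp ++ c :: r) = some (sp.length, c :: r) := by
  induction sp with
  | nil => simp [pvSkipSpacesA, hc]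
  | cons x xs ih =>
    have hx : x = ' ' := hsp x (by simp)
    simp [pvSkipSpacesA, hx, ih fun y hy => hsp y (by simp [hy])]

lemma pv_parenA_decomp (u v : List Char) (h : ')' ∉ u) :
    pvFindParenA (u ++ ')' :: v) = some u.length := by
  induction u with
  | nil => simp [pvFindParenA]
  | cons x xs ih =>
    have : x ≠ ')' := fun he => h (by simp [he])
    simp [pvFindParenA, this, ih fun hm => h (by simp [hm])]

lemma pv_scanA_skip (a : List Char) : ∀ (r : List Char) (i cont : Nat), ';' ∉ a → cont ≠ 2 →
    pvScanA (a ++ r) i cont = pvScanA r (i + a.length) cont := by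
  induction a with
  | nil => intro r i cont _ _; simp
  | cons c t ih =>
    intro r i cont ha hc
    have hcn : c ≠ ';' := fun he => ha (by simp [he])
    rw [List.cons_append, pvScanA]
    simp only [hcn, if_false, if_neg hc]
    rw [ih r (i+1) cont (fun hm => ha (by simp [hm])) hc]
    congr 1
    simp; omega

-- A's scan when fewer than two ';' occur: the initial (0, 0) survives
lemma pv_scanA_zero (l : List Char) (h : ';' ∉ l) : pvScanA l 0 0 = some (0, 0) := by
  have := pv_scanA_skip l [] 0 0 h (by omega)
  rw [List.append_nil] at this
  rw [this]; rfl

lemma pv_scanA_one (a b : List Char) (ha : ';' ∉ a) (hb : ';' ∉ b) :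
    pvScanA (a ++ ';' :: b) 0 0 = some (0, 0) := by
  rw [pv_scanA_skip a (';' :: b) 0 0 ha (by omega), pvScanA]
  norm_num
  have := pv_scanA_skip b [] (a.length + 1) 1 hb (by omega)
  rw [List.append_nil] at this
  rw [this]; rfl

-- A's scan when a second ';' is found: break at it, skip the spaces, find the ')'
lemma pv_scanA_two (a b sp u v : List Char) (c0 : Char) (st' : List Char)
    (ha : ';' ∉ a) (hb : ';' ∉ b) (hsp : ∀ x ∈ sp, x = ' ') (hu : ')' ∉ u)
    (hst : u ++ ')' :: v = c0 :: st') (hc0 : c0 ≠ ' ') :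
    pvScanA (a ++ ';' :: (b ++ ';' :: (sp ++ (u ++ ')' :: v)))) 0 0
      = some (a.length + 1 + b.length + 1 + sp.length,
              a.length + 1 + b.length + sp.length + u.length) := by
  rw [pv_scanA_skip a _ 0 0 ha (by omega), pvScanA]
  norm_num
  rw [pv_scanA_skip b _ (a.length + 1) 1 hb (by omega), pvScanA]
  norm_num
  rw [hst, pv_skipA_decomp sp c0 st' hsp hc0, ← hst]
  simp only [pv_parenA_decomp u v hu]

lemma pv_identB_true (r : List Char) : ∀ acc, pvIdentB r true acc = pvCollectA r acc := by
  induction r with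
  | nil => intro acc; rfl
  | cons c t ih =>
    intro acc
    by_cases hw : PySem.Chars.isalnum c = true ∨ c = '_'
    · simp [pvIdentB, pvCollectA, hw, ih]
    · simp [pvIdentB, pvCollectA, hw]

lemma pv_identB_false (s : List Char) : pvIdentB s false [] = pvCollectA (pvSkipNW s) [] := by
  induction s with
  | nil => rfl
  | cons c t ih =>
    by_cases hw : PySem.Chars.isalnum c = true ∨ c = '_'
    · have hnw : ¬ (c ≠ '_' ∧ ¬ (PySem.Chars.isalnum c = true)) := by tauto
      simp only [pvIdentB, pvSkipNW, if_pos hw, if_neg hnw, pv_identB_true, pvCollectA]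
    · have hnw : c ≠ '_' ∧ ¬ (PySem.Chars.isalnum c = true) := by tauto
      simp [pvIdentB, pvSkipNW, hnw, ih]

-- B's _rewrite computes exactly A's modifica_incremento value
lemma pv_rewrite_eq (inc p : List Char) : pvRewriteB inc p = pvModIncA inc p := by
  simp only [pvRewriteB, pvModIncA, pv_identB_false]

lemma pv_rebuildA_past (l : List Char) (pi pf : Nat) (d0 : List Char) :
    ∀ fuel i acc, pi < i → l.length ≤ fuel + i →
    pvRebuildA l pi pf d0 fuel i acc = acc ++ l.drop i := by
  intro fuel
  induction fuel with
  | zero =>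
    intro i acc hpi hlen
    simp [pvRebuildA, List.drop_eq_nil_of_le (by omega : l.length ≤ i)]
  | succ fuel ih =>
    intro i acc hpi hlen
    by_cases hl : i < l.length
    · have hne : i ≠ pi := by omega
      rw [pvRebuildA, dif_pos hl, if_pos hne, ih (i+1) _ (by omega) (by omega),
        List.drop_eq_getElem_cons hl]
      simp
    · rw [pvRebuildA, dif_neg hl, List.drop_eq_nil_of_le (by omega), List.append_nil]

lemma pv_rebuildA_main (l : List Char) (pi pf : Nat) (d0 : List Char)
    (hpil : pi < l.length) (hpf : pi ≤ pf) :
    ∀ fuel i acc, i ≤ pi → l.length + 1 ≤ fuel + i →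
    pvRebuildA l pi pf d0 fuel i acc
      = acc ++ (l.drop i).take (pi - i) ++ d0 ++ l.drop (pf + 1) := by
  intro fuel
  induction fuel with
  | zero => intro i acc h1 h2; omega
  | succ fuel ih =>
    intro i acc h1 h2
    have hl : i < l.length := by omega
    by_cases hip : i = pi
    · subst hip
      rw [pvRebuildA, dif_pos hl, if_neg (by simp),
        pv_rebuildA_past l i pf d0 fuel (pf+1) _ (by omega) (by omega)]
      simp
    · have this : pi - i = (pi - (i+1)) + 1 := by omega
      rw [pvRebuildA, dif_pos hl, if_pos hip, ih (i+1) _ (by omega) (by omega),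
        this]
      rw [List.drop_eq_getElem_cons hl, List.take_succ_cons]
      simp

lemma pv_singleton_prefix (c : Char) (t : List Char) : [c] <+: t ↔ t.head? = some c := by
  cases t with
  | nil => simp
  | cons x xs => simp [List.cons_prefix_cons, eq_comm]

lemma pv_find_char_none (t : List Char) (c : Char) (h : c ∉ t) :
    PySem.Chars.find t [c] = -1 := by
  rw [PySem.Chars.find_eq_neg_one_iff]
  intro hinf
  exact h (by
    obtain ⟨s, t', ht⟩ := hinf
    subst ht; simp)

lemma pv_find_char (a r : List Char) (c : Char) (h : c ∉ a) :
    PySem.Chars.find (a ++ c :: r) [c] = (a.length : Int) := by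
  have hinf : [c] <:+: (a ++ c :: r) := ⟨a, r, by simp⟩
  have h0 : 0 ≤ PySem.Chars.find (a ++ c :: r) [c] :=
    (PySem.Chars.find_nonneg_iff _ _).2 hinf
  obtain ⟨hpre, hmin⟩ := PySem.Chars.find_spec h0
  set j := (PySem.Chars.find (a ++ c :: r) [c]).toNat with hj
  have hja : j ≤ a.length := by
    by_contra hgt
    exact hmin a.length (by omega) ((pv_singleton_prefix c _).2 (by simp))
  have hje : j = a.length := by
    rcases Nat.lt_or_ge j a.length with hlt | hge
    · exfalso
      have hdrop : List.drop j (a ++ c :: r) = List.drop j a ++ c :: r :=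
        List.drop_append_of_le_length (by omega)
      have := (pv_singleton_prefix c _).1 hpre
      rw [hdrop, List.drop_eq_getElem_cons (by omega : j < a.length),
        List.cons_append, List.head?_cons, Option.some_inj] at this
      exact h (this ▸ List.getElem_mem _)
    · omega
  omega

lemma pv_dropWhile_mem (l : List Char) (c : Char) (h : c ∈ l) :
    l.dropWhile (· != c) = c :: (l.dropWhile (· != c)).drop 1 := by
  have hne : l.dropWhile (· != c) ≠ [] := by
    intro he
    have hl := List.takeWhile_append_dropWhile (p := (· != c)) (l := l)
    rw [he, List.append_nil] at hl
    rw [← hl] at h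
    have := List.mem_takeWhile_imp h
    simp at this
  cases hd : l.dropWhile (· != c) with
  | nil => exact absurd hd hne
  | cons x xs =>
    have hh := List.head?_dropWhile_not (· != c) l
    rw [hd] at hh
    simp at hh
    simp [hh]

-- no '+' / '-' as a substring of a short clause not containing it
lemma pv_isIn_single_false (c d : Char) (h : c ≠ d) :
    PySem.Chars.isIn [d] [c] = false := by
  rw [PySem.Chars.isIn_eq_false_iff]
  intro hinf
  have hd : d ∈ [c] := hinf.subset (List.mem_singleton_self d)
  simp at hd
  exact h hd.symm

-- B finds no second ';' exactly when the header has fewer than two ';'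
lemma pv_no_second (l : List Char) (h : l.count ';' < 2) :
    PySem.Chars.findFrom l [';'] (PySem.Chars.find l [';'] + 1) none = -1 := by
  by_cases hm : ';' ∈ l
  · set a := l.takeWhile (· != ';') with hadef
    set r1 := (l.dropWhile (· != ';')).drop 1 with hr1def
    have hd1 : l.dropWhile (· != ';') = ';' :: r1 := pv_dropWhile_mem l ';' hm
    have hl : l = a ++ ';' :: r1 := by
      conv_lhs => rw [← List.takeWhile_append_dropWhile (p := (· != ';')) (l := l)]
      rw [hd1]
    have ha : ';' ∉ a := fun hx => by simpa using List.mem_takeWhile_imp hx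
    have hb : ';' ∉ r1 := by
      intro hx
      have hca : a.count ';' = 0 := List.count_eq_zero.2 ha
      have hcr : 0 < r1.count ';' := List.count_pos_iff.2 hx
      have : l.count ';' = a.count ';' + (r1.count ';' + 1) := by
        rw [hl]; simp [List.count_append]
      omega
    have hi1 : PySem.Chars.find l [';'] = (a.length : Int) := by
      rw [hl]; exact pv_find_char a r1 ';' ha
    have hk1 : a.length + 1 ≤ l.length := by rw [hl]; simp
    have hdrop1 : List.drop (a.length + 1) l = r1 := by
      rw [hl, show a ++ ';' :: r1 = (a ++ [';']) ++ r1 by simp]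
      exact List.drop_left' (by simp)
    have hcast : ((a.length : Int) + 1) = ((a.length + 1 : Nat) : Int) := by push_cast; ring
    rw [hi1, hcast, PySem.Chars.findFrom_natCast l [';'] (a.length + 1) hk1, hdrop1,
      pv_find_char_none r1 ';' hb]
    simp
  · have hi1 : PySem.Chars.find l [';'] = -1 := pv_find_char_none l ';' hm
    rw [hi1]
    norm_num [PySem.Chars.findFrom_zero]
    exact hi1

-- A's fallback on fewer than two ';' : the rebuilt line is first-clause ++ rest
lemma pv_rebuildA_fallback (l d0 : List Char) :
    pvRebuildA l 0 0 d0 (l.length + 1) 0 [] = (if l = [] then [] else d0 ++ l.drop 1) := by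
  cases l with
  | nil => rfl
  | cons c t =>
    rw [if_neg (by simp)]
    rw [pv_rebuildA_main _ 0 0 _ (by simp) (le_refl 0) _ 0 [] (le_refl 0) (by omega)]
    simp

-- the A-side increment slice in the fallback case is l[0:1]
lemma pv_slice01 (l : List Char) :
    PySem.List.slice l (some ((0 : Nat) : Int)) (some (((0 : Nat) : Int) + 1)) = l.take 1 := by
  have h01 : ((0 : Nat) : Int) + 1 = ((1 : Nat) : Int) := by norm_num
  rw [h01, PySem.List.slice_natCast]; simp

-- ===== VERDICT (by name: the statement is the Claim_ definition above) =====
theorem modifica_loop_for_spec : Claim_unchanged_modifica_loop_for := by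
  intro s param _ hpre
  obtain ⟨_hp, hsemi⟩ := hpre
  unfold Spec_modifica_loop_for
  intro hnD
  by_cases h2 : 2 ≤ s.toList.count ';'
  · -- a second ';' exists: both ports rewrite the increment clause in place
    set l := s.toList with hl0
    have hsem := hsemi h2
    set a := l.takeWhile (· != ';') with hadef
    set r1 := (l.dropWhile (· != ';')).drop 1 with hr1def
    have hm : ';' ∈ l := List.count_pos_iff.1 (by omega)
    have hd1 : l.dropWhile (· != ';') = ';' :: r1 := pv_dropWhile_mem l ';' hm
    have hl : l = a ++ ';' :: r1 := by
      conv_lhs => rw [← List.takeWhile_append_dropWhile (p := (· != ';')) (l := l)]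
      rw [hd1]
    have ha : ';' ∉ a := fun hx => by simpa using List.mem_takeWhile_imp hx
    have hm2 : ';' ∈ r1 := by
      by_contra hx
      have hca : a.count ';' = 0 := List.count_eq_zero.2 ha
      have hcr : r1.count ';' = 0 := List.count_eq_zero.2 hx
      have : l.count ';' = a.count ';' + (r1.count ';' + 1) := by
        rw [hl]; simp [List.count_append]
      omega
    set b := r1.takeWhile (· != ';') with hbdef
    set t := (r1.dropWhile (· != ';')).drop 1 with htdef
    have hd2 : r1.dropWhile (· != ';') = ';' :: t := pv_dropWhile_mem r1 ';' hm2
    have hr1 : r1 = b ++ ';' :: t := by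
      conv_lhs => rw [← List.takeWhile_append_dropWhile (p := (· != ';')) (l := r1)]
      rw [hd2]
    have hb : ';' ∉ b := fun hx => by simpa using List.mem_takeWhile_imp hx
    set st := t.dropWhile (· == ' ') with hstdef
    obtain ⟨hhead, hpin⟩ := hsem
    set sp := t.takeWhile (· == ' ') with hspdef
    have hspc : ∀ x ∈ sp, x = ' ' := fun x hx => by simpa using List.mem_takeWhile_imp hx
    have ht : t = sp ++ st :=
      (List.takeWhile_append_dropWhile (p := (· == ' ')) (l := t)).symm
    have hstne : st ≠ [] := fun he => by rw [he] at hpin; simp at hpin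
    obtain ⟨c0, st', hstc⟩ := List.exists_cons_of_ne_nil hstne
    have hc0 : c0 ≠ ' ' := by
      have hh := List.head?_dropWhile_not (· == ' ') t
      rw [← hstdef, hstc] at hh
      simpa using hh
    set u := st.takeWhile (· != ')') with hudef
    set v := (st.dropWhile (· != ')')).drop 1 with hvdef
    have hd3 : st.dropWhile (· != ')') = ')' :: v := pv_dropWhile_mem st ')' hpin
    have hst : st = u ++ ')' :: v := by
      conv_lhs => rw [← List.takeWhile_append_dropWhile (p := (· != ')')) (l := st)]
      rw [hd3]
    have hu : ')' ∉ u := fun hx => by simpa using List.mem_takeWhile_imp hx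
    have hune : u ≠ [] := by
      intro he
      exact hhead (by rw [hst, he]; simp)
    have hul : 0 < u.length := List.length_pos_iff.2 hune
    have hstl : 0 < st.length := List.length_pos_iff.2 hstne
    have hLfull : l = a ++ ';' :: (b ++ ';' :: (sp ++ (u ++ ')' :: v))) := by
      rw [hl, hr1, ht, hst]
    set P := a ++ ';' :: (b ++ ';' :: sp) with hPdef
    have hPlen : P.length = a.length + 1 + b.length + 1 + sp.length := by
      simp [hPdef]; omega
    have hPst : l = P ++ st := by
      rw [hLfull, ← hst, hPdef]; simp
    have hllen : l.length = P.length + st.length := by rw [hPst]; simp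
    -- A's scan
    have hstc' : u ++ ')' :: v = c0 :: st' := by rw [← hst, hstc]
    have hA := pv_scanA_two a b sp u v c0 st' ha hb hspc hu hstc' hc0
    rw [← hLfull] at hA
    -- the increment slice of A
    have hdpP : List.drop (a.length + 1 + b.length + 1 + sp.length) l = st := by
      rw [hPst]; exact List.drop_left' (by omega)
    have htkP : List.take (a.length + 1 + b.length + 1 + sp.length) l = P := by
      rw [hPst]; exact List.take_left' (by omega)
    have hinc : PySem.List.slice l
        (some ((a.length + 1 + b.length + 1 + sp.length : Nat) : Int))
        (some (((a.length + 1 + b.length + sp.length + u.length : Nat) : Int) + 1)) = u := by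
      rw [show (((a.length + 1 + b.length + sp.length + u.length : Nat) : Int) + 1)
            = ((a.length + 1 + b.length + sp.length + u.length + 1 : Nat) : Int) by push_cast; ring,
        PySem.List.slice_natCast, hdpP,
        show a.length + 1 + b.length + sp.length + u.length + 1
              - (a.length + 1 + b.length + 1 + sp.length) = u.length by omega,
        hst]
      exact List.take_left' rfl
    -- drop past the increment
    have hdpu : List.drop (a.length + 1 + b.length + sp.length + u.length + 1) l = ')' :: v := by
      rw [hPst, hst, show P ++ (u ++ ')' :: v) = (P ++ u) ++ ')' :: v by simp]
      exact List.drop_left' (by simp [hPlen]; omega)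
    -- B's finds
    have hi1 : PySem.Chars.find l [';'] = (a.length : Int) := by
      rw [hl]; exact pv_find_char a r1 ';' ha
    have hk1 : a.length + 1 ≤ l.length := by rw [hl]; simp
    have hdrop1 : List.drop (a.length + 1) l = r1 := by
      rw [hl, show a ++ ';' :: r1 = (a ++ [';']) ++ r1 by simp]
      exact List.drop_left' (by simp)
    have hff : PySem.Chars.findFrom l [';'] ((a.length : Int) + 1) none
        = ((a.length + 1 : Nat) : Int) + (b.length : Int) := by
      rw [show ((a.length : Int) + 1) = ((a.length + 1 : Nat) : Int) by push_cast; ring,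
        PySem.Chars.findFrom_natCast l [';'] (a.length + 1) hk1, hdrop1, hr1,
        pv_find_char b t ';' hb]
      simp
    have hffne : (((a.length + 1 : Nat) : Int) + (b.length : Int)) ≠ -1 := by
      push_cast; omega
    have hdropt : List.drop (a.length + b.length + 2) l = t := by
      rw [hl, hr1, show a ++ ';' :: (b ++ ';' :: t) = (a ++ ';' :: b ++ [';']) ++ t by simp]
      exact List.drop_left' (by simp; omega)
    have htail : PySem.List.slice l (some (((a.length + 1 : Nat) : Int) + (b.length : Int) + 1)) none = t := by
      rw [show (((a.length + 1 : Nat) : Int) + (b.length : Int) + 1)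
            = ((a.length + b.length + 2 : Nat) : Int) by push_cast; ring,
        PySem.List.slice_from l (by positivity)]
      simpa using hdropt
    have hpre : PySem.List.slice l none (some (PySem.List.len l - PySem.List.len st)) = P := by
      simp only [PySem.List.len_eq]
      rw [show ((l.length : Int) - (st.length : Int)) = ((P.length : Nat) : Int) by
            rw [hllen]; push_cast; ring,
        PySem.List.slice_to l (by positivity)]
      rw [Int.toNat_natCast, hPst]
      exact List.take_left' rfl
    have hj : PySem.Chars.find st [')'] = (u.length : Int) := by
      rw [hst]; exact pv_find_char u v ')' hu
    have hincB : PySem.List.slice st none (some ((u.length : Nat) : Int)) = u := by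
      rw [PySem.List.slice_to st (by positivity), Int.toNat_natCast, hst]
      exact List.take_left' rfl
    have hrestB : PySem.List.slice st (some ((u.length : Nat) : Int)) none = ')' :: v := by
      rw [PySem.List.slice_from st (by positivity), Int.toNat_natCast, hst]
      exact List.drop_left' rfl
    -- assemble
    simp only [modifica_loop_for, modifica_loop_for_alt]
    rw [← hl0]
    simp only [hA, hi1, hff, if_neg hffne, htail, ← hstdef, hpre, hj, hincB,
      hrestB, hinc]
    rw [pv_rebuildA_main l (a.length + 1 + b.length + 1 + sp.length)
          (a.length + 1 + b.length + sp.length + u.length) _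
          (by omega) (by omega) _ 0 [] (by omega) (by omega)]
    rw [List.drop_zero, Nat.sub_zero, htkP, hdpu, pv_rewrite_eq]
    simp
  · -- fewer than two ';': A falls through to (0, 0), B returns the input unchanged;
    -- outside D_ the first clause l[0:1] is not rewritten, so A also returns the input
    set l := s.toList with hl0
    have hcount : l.count ';' < 2 := by omega
    have hA : pvScanA l 0 0 = some (0, 0) := by
      by_cases hm : ';' ∈ l
      · set a := l.takeWhile (· != ';') with hadef
        set r1 := (l.dropWhile (· != ';')).drop 1 with hr1def
        have hd1 : l.dropWhile (· != ';') = ';' :: r1 := pv_dropWhile_mem l ';' hm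
        have hl : l = a ++ ';' :: r1 := by
          conv_lhs => rw [← List.takeWhile_append_dropWhile (p := (· != ';')) (l := l)]
          rw [hd1]
        have ha : ';' ∉ a := fun hx => by simpa using List.mem_takeWhile_imp hx
        have hb : ';' ∉ r1 := by
          intro hx
          have hca : a.count ';' = 0 := List.count_eq_zero.2 ha
          have hcr : 0 < r1.count ';' := List.count_pos_iff.2 hx
          have : l.count ';' = a.count ';' + (r1.count ';' + 1) := by
            rw [hl]; simp [List.count_append]
          omega
        rw [hl]; exact pv_scanA_one a r1 ha hb
      · exact pv_scanA_zero l hm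
    have hB := pv_no_second l hcount
    have hModInc : pvModIncA (l.take 1) (pvPow2 param) = l.take 1 := by
      cases hc : l with
      | nil =>
        simp [pvModIncA, show PySem.Chars.isIn ['+'] ([] : List Char) = false from by decide,
          show PySem.Chars.isIn ['-'] ([] : List Char) = false from by decide]
      | cons c t =>
        have hcp : c ≠ '+' := by
          intro he; exact hnD ⟨hcount, Or.inl (by rw [← hl0, hc, he]; rfl)⟩
        have hcm : c ≠ '-' := by
          intro he; exact hnD ⟨hcount, Or.inr (by rw [← hl0, hc, he]; rfl)⟩
        simp only [List.take_succ_cons, List.take_zero, pvModIncA,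
          pv_isIn_single_false c '+' hcp, pv_isIn_single_false c '-' hcm]
        simp
    have hRB : pvRebuildA l 0 0 (pvModIncA (l.take 1) (pvPow2 param)) (l.length + 1) 0 [] = l := by
      rw [pv_rebuildA_fallback, hModInc]
      cases l with
      | nil => simp
      | cons c t => simp
    simp only [modifica_loop_for, modifica_loop_for_alt]
    rw [← hl0]
    simp only [hA, hB, pv_slice01, hRB]
    simp [hl0]

theorem modifica_loop_for_changed : Claim_changed_modifica_loop_for := by
  unfold Claim_changed_modifica_loop_for; decide

theorem modifica_loop_for_tight : Claim_exact_modifica_loop_for := by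
  intro s param _ hpre hD
  obtain ⟨hcount, hhd⟩ := hD
  set l := s.toList with hl0
  have hm : ∃ c t, l = c :: t ∧ (c = '+' ∨ c = '-') := by
    rcases hhd with h | h
    · cases hc : l with
      | nil => rw [hc] at h; simp at h
      | cons c t =>
        rw [hc] at h; simp at h
        exact ⟨c, t, rfl, Or.inl h⟩
    · cases hc : l with
      | nil => rw [hc] at h; simp at h
      | cons c t =>
        rw [hc] at h; simp at h
        exact ⟨c, t, rfl, Or.inr h⟩
  obtain ⟨c, t, hc, hcpm⟩ := hm
  have hA : pvScanA l 0 0 = some (0, 0) := by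
    by_cases hmem : ';' ∈ l
    · set a := l.takeWhile (· != ';') with hadef
      set r1 := (l.dropWhile (· != ';')).drop 1 with hr1def
      have hd1 : l.dropWhile (· != ';') = ';' :: r1 := pv_dropWhile_mem l ';' hmem
      have hl : l = a ++ ';' :: r1 := by
        conv_lhs => rw [← List.takeWhile_append_dropWhile (p := (· != ';')) (l := l)]
        rw [hd1]
      have ha : ';' ∉ a := fun hx => by simpa using List.mem_takeWhile_imp hx
      have hb : ';' ∉ r1 := by
        intro hx
        have hca : a.count ';' = 0 := List.count_eq_zero.2 ha
        have hcr : 0 < r1.count ';' := List.count_pos_iff.2 hx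
        have : l.count ';' = a.count ';' + (r1.count ';' + 1) := by
          rw [hl]; simp [List.count_append]
        omega
      rw [hl]; exact pv_scanA_one a r1 ha hb
    · exact pv_scanA_zero l hmem
  have hB := pv_no_second l hcount
  -- A's rewritten first clause begins with ' '
  have hhw : (pvModIncA (l.take 1) (pvPow2 param)).head? = some ' ' := by
    rw [hc]
    simp only [List.take_succ_cons, List.take_zero]
    rcases hcpm with h | h <;> subst h
    · simp [pvModIncA, show pvSkipNW ['+'] = [] from by decide,
        show PySem.Chars.isIn ['+'] ['+'] = true from by decide, pvCollectA]
    · simp [pvModIncA, show pvSkipNW ['-'] = [] from by decide,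
        show PySem.Chars.isIn ['+'] ['-'] = false from by decide,
        show PySem.Chars.isIn ['-'] ['-'] = true from by decide, pvCollectA]
  obtain ⟨w, hw⟩ : ∃ w, pvModIncA (l.take 1) (pvPow2 param) = ' ' :: w := by
    cases hM : pvModIncA (l.take 1) (pvPow2 param) with
    | nil => rw [hM] at hhw; simp at hhw
    | cons x xs =>
      rw [hM] at hhw; simp at hhw
      exact ⟨xs, by rw [hhw]⟩
  intro heq
  simp only [modifica_loop_for, modifica_loop_for_alt] at heq
  rw [← hl0] at heq
  simp only [hA, hB, pv_slice01, hw, pv_rebuildA_fallback] at heq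
  rw [if_pos trivial, if_neg (by rw [hc]; simp)] at heq
  have htl := congrArg String.toList heq
  simp only [String.toList_ofList, hl0] at htl
  rw [← hl0, hc] at htl
  have : ' ' = c := by
    have h2 := congrArg List.head? htl
    simp at h2
    exact h2
  rcases hcpm with h | h <;> rw [h] at this <;> exact absurd this (by decide)
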